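-- pv_equiv track=rewrite | github.com/Melisandra29/python-project-lvl1 | les_hexlet_22.py | filter_string
-- ===== SOURCE A (Python) =====
-- def filter_string(my_string, element):
--     result = ''
--     for char in my_string:
--       if char.lower() != element.lower():
--         result = result + char
--       else:
--         result = result
--     result = result.strip()
--     while '  ' in result:
--       result = result.replace('  ', ' ')
--     return result
-- ===== SOURCE B (Python) =====
-- def filter_string(my_string, element):
--     target = element.lower()
--     stripped = ''.join(c for c in my_string if c.lower() != target).strip()
--     return ' '.join(w for w in stripped.split(' ') if w)
-- ===== Notes on version B (the rewrite author's own statement) =====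
-- stated objective: faster
-- what changed: The strip-then-repeated-replace(' ',' ') fixpoint loop is replaced by a single tokenize pass (strip, split on ' ', drop empty tokens, ' '-join), and the quadratic result=result+char concatenation by one join over a comprehension.
import Mathlib
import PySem

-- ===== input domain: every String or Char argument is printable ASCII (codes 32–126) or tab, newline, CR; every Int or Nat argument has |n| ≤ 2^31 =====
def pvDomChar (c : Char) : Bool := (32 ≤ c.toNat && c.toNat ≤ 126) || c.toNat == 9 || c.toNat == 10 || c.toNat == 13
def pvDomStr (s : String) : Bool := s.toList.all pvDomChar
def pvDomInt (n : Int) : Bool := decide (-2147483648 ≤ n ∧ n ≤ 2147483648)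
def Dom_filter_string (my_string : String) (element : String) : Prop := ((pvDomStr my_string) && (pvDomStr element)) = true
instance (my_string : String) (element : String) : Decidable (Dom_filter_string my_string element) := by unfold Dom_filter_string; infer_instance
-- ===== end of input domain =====

-- B replaces A's repeated replace('  ',' ') fixpoint loop by one strip/split(' ')/drop-empties/join pass, and the quadratic string concatenation by a join (measured faster; return values proved equal).

-- ===== PORT A =====
-- pvRep / pvDbl model one replace('  ',' ') pass resp. the '"  " in s' test; they are
-- needed for the termination of pvCollapse (pvLenReplaceLt is cited in decreasing_by).
def pvRep : List Char → List Char
  | c :: d :: r => if c = ' ' ∧ d = ' ' then ' ' :: pvRep r else c :: pvRep (d :: r)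
  | l => l

def pvDbl : List Char → Bool
  | c :: d :: r => (decide (c = ' ') && decide (d = ' ')) || pvDbl (d :: r)
  | _ => false

lemma pvRep_length_le : ∀ t : List Char, (pvRep t).length ≤ t.length := by
  intro t
  induction t using pvRep.induct with
  | case1 c d r hcd ih => simp [pvRep, hcd]; omega
  | case2 c d r hcd ih => simp [pvRep, hcd]; simpa using ih
  | case3 l h =>
    match l, h with
    | [], _ => simp [pvRep]
    | [c], _ => simp [pvRep]
    | c :: d :: r, h => exact absurd rfl (h c d r)

lemma pvRep_length_lt : ∀ t : List Char, pvDbl t = true → (pvRep t).length < t.length := by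
  intro t
  induction t using pvRep.induct with
  | case1 c d r hcd ih => intro _; simp [pvRep, hcd]; have := pvRep_length_le r; omega
  | case2 c d r hcd ih =>
    intro h
    simp [pvDbl] at h
    rcases h with h | h
    · exact absurd ⟨h.1, h.2⟩ hcd
    · simp [pvRep, hcd]; simpa using ih h
  | case3 l h =>
    intro hd
    match l, h with
    | [], _ => simp [pvDbl] at hd
    | [c], _ => simp [pvDbl] at hd
    | c :: d :: r, h => exact absurd rfl (h c d r)

lemma pvDbl_iff : ∀ t : List Char, pvDbl t = true ↔ [' ', ' '] <:+: t := by
  intro t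
  induction t using pvDbl.induct with
  | case1 c d r ih =>
    rw [List.infix_cons_iff]
    simp [pvDbl, ih, List.cons_prefix_cons]
    tauto
  | case2 l h =>
    match l, h with
    | [], _ =>
      simp only [pvDbl, Bool.false_eq_true, false_iff]
      intro h; have := h.length_le; simp at this
    | [c], _ =>
      simp only [pvDbl, Bool.false_eq_true, false_iff]
      intro h; have := h.length_le; simp at this
    | c :: d :: r, h => exact absurd rfl (h c d r)

lemma pvIsIn_eq_dbl (t : List Char) : PySem.Chars.isIn [' ', ' '] t = pvDbl t := by
  cases h : pvDbl t
  · rw [PySem.Chars.isIn_eq_false_iff]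
    rw [← pvDbl_iff, h]; simp
  · rw [(PySem.Chars.isIn_iff_infix _ _).2 ((pvDbl_iff t).1 h)]

lemma pvReplace_go : ∀ (fuel : Nat) (l acc : List Char), l.length ≤ fuel →
    PySem.Chars.replace.go [' ', ' '] [' '] fuel l acc = acc.reverse ++ pvRep l := by
  intro fuel
  induction fuel with
  | zero =>
    intro l acc h
    have : l = [] := by cases l <;> simp_all
    subst this
    simp [PySem.Chars.replace.go, pvRep]
  | succ n ih =>
    intro l acc h
    match l with
    | [] => simp [PySem.Chars.replace.go, pvRep]
    | c :: t =>
      rw [PySem.Chars.replace.go]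
      by_cases hp : [' ', ' '].isPrefixOf (c :: t) = true
      · rw [if_pos hp]
        match t, hp with
        | [], hp => simp [List.isPrefixOf] at hp
        | d :: r, hp =>
          simp [List.isPrefixOf] at hp
          obtain ⟨hc, hd⟩ := hp
          subst hc; subst hd
          simp only [List.length_cons, List.drop_succ_cons, List.length_nil, List.drop_zero]
          simp at h
          rw [ih r ([' '].reverse ++ acc) (by omega)]
          simp [pvRep]
      · rw [if_neg hp]
        rw [ih t (c :: acc) (by simp at h; omega)]
        match t with
        | [] => simp [pvRep]
        | d :: r =>
          have hcd : ¬ (c = ' ' ∧ d = ' ') := by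
            intro ⟨h1, h2⟩; subst h1; subst h2; simp [List.isPrefixOf] at hp
          simp [pvRep, hcd]

lemma pvReplace_eq (t : List Char) :
    PySem.Chars.replace t [' ', ' '] [' '] = pvRep t := by
  rw [PySem.Chars.replace]
  simp only [List.isEmpty_cons]
  exact (pvReplace_go t.length t [] (le_refl _)).trans (by simp)

lemma pvLenReplaceLt (t : List Char) (h : PySem.Chars.isIn [' ', ' '] t = true) :
    (PySem.Chars.replace t [' ', ' '] [' ']).length < t.length := by
  rw [pvReplace_eq]
  exact pvRep_length_lt t ((pvIsIn_eq_dbl t).symm.trans h)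

-- the 'while "  " in result: result = result.replace("  ", " ")' loop of A
def pvCollapse (t : List Char) : List Char :=
  if h : PySem.Chars.isIn [' ', ' '] t = true then
    pvCollapse (PySem.Chars.replace t [' ', ' '] [' '])
  else t
termination_by t.length
decreasing_by exact pvLenReplaceLt t h

def filter_string (my_string : String) (element : String) : String :=
  let el := PySem.Chars.lower element.toList
  let result : List Char :=
    my_string.toList.foldl
      (fun res c => if PySem.Chars.lower [c] ≠ el then res ++ [c] else res) []
  String.ofList (pvCollapse (PySem.Chars.strip result))

-- ===== PORT B =====
def filter_string_alt (my_string : String) (element : String) : String :=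
  let el := PySem.Chars.lower element.toList
  -- ''.join(c for c in my_string if c.lower() != target): the kept characters, in order
  let kept : List Char := my_string.toList.filter (fun c => PySem.Chars.lower [c] ≠ el)
  let stripped := PySem.Chars.strip kept
  String.ofList (PySem.Chars.join [' '] ((PySem.Chars.splitOn stripped [' ']).filter (fun w => w ≠ [])))

-- ===== PRECONDITION & SPEC =====
def Spec_filter_string (my_string : String) (element : String) (out : String) : Prop := out = filter_string_alt my_string element
instance (my_string : String) (element : String) (out : String) : Decidable (Spec_filter_string my_string element out) := by unfold Spec_filter_string; infer_instance

-- ===== CLAIM (what is proved, stated in full; the proofs are below) =====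
def Claim_equal_filter_string : Prop := ∀ (my_string : String) (element : String), Dom_filter_string my_string element → Spec_filter_string my_string element (filter_string my_string element)

-- ===== LEMMAS AND PROOFS =====

-- proof-side model of split(' ')
def pvSp : List Char → List (List Char)
  | [] => [[]]
  | c :: r => if c = ' ' then [] :: pvSp r else (c :: (pvSp r).headI) :: (pvSp r).tail

lemma pvSp_ne_nil (t : List Char) : pvSp t ≠ [] := by
  cases t with
  | nil => simp [pvSp]
  | cons c r => simp only [pvSp]; split <;> simp

lemma pvSp_decomp (t : List Char) : (pvSp t).headI :: (pvSp t).tail = pvSp t := by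
  have := pvSp_ne_nil t
  cases h : pvSp t <;> simp_all

lemma pvSplitOn_go : ∀ (fuel : Nat) (l cur : List Char) (accs : List (List Char)),
    l.length ≤ fuel →
    PySem.Chars.splitOn.go [' '] fuel l cur accs =
      accs.reverse ++ (cur.reverse ++ (pvSp l).headI) :: (pvSp l).tail := by
  intro fuel
  induction fuel with
  | zero =>
    intro l cur accs h
    have : l = [] := by cases l <;> simp_all
    subst this
    simp [PySem.Chars.splitOn.go, pvSp]
  | succ n ih =>
    intro l cur accs h
    match l with
    | [] => simp [PySem.Chars.splitOn.go, pvSp]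
    | c :: t =>
      rw [PySem.Chars.splitOn.go]
      by_cases hp : [' '].isPrefixOf (c :: t) = true
      · rw [if_pos hp]
        simp [List.isPrefixOf] at hp
        subst hp
        simp at h
        simp only [List.length_cons, List.drop_succ_cons, List.length_nil, List.drop_zero]
        rw [ih t [] (cur.reverse :: accs) (by omega)]
        simp [pvSp, pvSp_decomp]
      · rw [if_neg hp]
        simp [List.isPrefixOf] at hp
        rw [ih t (c :: cur) accs (by simp at h; omega)]
        have : ¬ c = ' ' := fun hh => hp hh.symm
        simp [pvSp, this]

lemma pvSplitOn_eq (t : List Char) : PySem.Chars.splitOn t [' '] = pvSp t := by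
  rw [PySem.Chars.splitOn]
  rw [pvSplitOn_go (t.length + 1) t [] [] (by omega)]
  simp [pvSp_decomp]

lemma pvRep_head? : ∀ t : List Char, (pvRep t).head? = t.head? := by
  intro t
  induction t using pvRep.induct with
  | case1 c d r hcd ih => obtain ⟨h1, h2⟩ := hcd; subst h1; subst h2; simp [pvRep]
  | case2 c d r hcd ih => simp [pvRep, hcd]
  | case3 l h =>
    match l, h with
    | [], _ => simp [pvRep]
    | [c], _ => simp [pvRep]
    | c :: d :: r, h => exact absurd rfl (h c d r)

lemma pvRep_ne_nil (t : List Char) (h : t ≠ []) : pvRep t ≠ [] := by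
  cases t with
  | nil => simp_all
  | cons c r =>
    have := pvRep_head? (c :: r)
    intro hh; rw [hh] at this; simp at this

lemma pvRep_getLast? : ∀ t : List Char, t.getLast? ≠ some ' ' → (pvRep t).getLast? = t.getLast? := by
  intro t
  induction t using pvRep.induct with
  | case1 c d r hcd ih =>
    obtain ⟨h1, h2⟩ := hcd; subst h1; subst h2
    intro h
    match r with
    | [] => simp at h
    | x :: r2 =>
      have hne : pvRep (x :: r2) ≠ [] := pvRep_ne_nil _ (by simp)
      obtain ⟨y, ys, hy⟩ := List.exists_cons_of_ne_nil hne
      rw [List.getLast?_cons_cons] at h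
      rw [List.getLast?_cons_cons, List.getLast?_cons_cons]
      rw [show pvRep (' ' :: ' ' :: x :: r2) = ' ' :: pvRep (x :: r2) by simp [pvRep]]
      rw [hy, List.getLast?_cons_cons, ← hy, ih h]
  | case2 c d r hcd ih =>
    intro h
    rw [List.getLast?_cons_cons] at h
    have hne : pvRep (d :: r) ≠ [] := pvRep_ne_nil _ (by simp)
    obtain ⟨y, ys, hy⟩ := List.exists_cons_of_ne_nil hne
    rw [show pvRep (c :: d :: r) = c :: pvRep (d :: r) by simp [pvRep, hcd]]
    rw [List.getLast?_cons_cons, hy, List.getLast?_cons_cons, ← hy, ih h]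
  | case3 l h =>
    match l, h with
    | [], _ => intro _; simp [pvRep]
    | [c], _ => intro _; simp [pvRep]
    | c :: d :: r, h => exact absurd rfl (h c d r)

lemma pvSp_headI_space (r : List Char) : (pvSp (' ' :: r)).headI = [] := by
  rw [pvSp.eq_2]; simp

lemma pvSp_tail_space (r : List Char) : (pvSp (' ' :: r)).tail = pvSp r := by
  rw [pvSp.eq_2]; simp

lemma pvSp_headI_cons (c : Char) (hc : c ≠ ' ') (r : List Char) :
    (pvSp (c :: r)).headI = c :: (pvSp r).headI := by
  rw [pvSp.eq_2, if_neg hc]; simp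

lemma pvSp_tail_cons (c : Char) (hc : c ≠ ' ') (r : List Char) :
    (pvSp (c :: r)).tail = (pvSp r).tail := by
  rw [pvSp.eq_2, if_neg hc]; simp

lemma pvTok_space (r : List Char) :
    (pvSp (' ' :: r)).filter (fun w => w ≠ []) = (pvSp r).filter (fun w => w ≠ []) := by
  rw [pvSp.eq_2]; simp

lemma pvTok_cons (c : Char) (hc : c ≠ ' ') (r : List Char) :
    (pvSp (c :: r)).filter (fun w => w ≠ []) =
      (c :: (pvSp r).headI) :: (pvSp r).tail.filter (fun w => w ≠ []) := by
  rw [pvSp.eq_2, if_neg hc]; simp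

lemma pvFilter_decomp (x : List Char) :
    (pvSp x).filter (fun w => w ≠ []) =
      (if (pvSp x).headI = [] then [] else [(pvSp x).headI]) ++ (pvSp x).tail.filter (fun w => w ≠ []) := by
  conv_lhs => rw [← pvSp_decomp x]
  rw [List.filter_cons]
  split <;> split <;> simp_all

lemma pvRep_tokens : ∀ t : List Char,
    (pvSp (pvRep t)).headI = (pvSp t).headI ∧
    (pvSp (pvRep t)).filter (fun w => w ≠ []) = (pvSp t).filter (fun w => w ≠ []) := by
  intro t
  induction t using pvRep.induct with
  | case1 c d r hcd ih =>
    obtain ⟨h1, h2⟩ := hcd; subst h1; subst h2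
    rw [show pvRep (' ' :: ' ' :: r) = ' ' :: pvRep r by simp [pvRep]]
    refine ⟨?_, ?_⟩
    · rw [pvSp_headI_space, pvSp_headI_space]
    · rw [pvTok_space, pvTok_space, pvTok_space, ih.2]
  | case2 c d r hcd ih =>
    rw [show pvRep (c :: d :: r) = c :: pvRep (d :: r) by simp [pvRep, hcd]]
    by_cases hc : c = ' '
    · subst hc
      refine ⟨?_, ?_⟩
      · rw [pvSp_headI_space, pvSp_headI_space]
      · rw [pvTok_space, pvTok_space, ih.2]
    · have htail : (pvSp (pvRep (d :: r))).tail.filter (fun w => w ≠ []) =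
          (pvSp (d :: r)).tail.filter (fun w => w ≠ []) := by
        have hfd := pvFilter_decomp (pvRep (d :: r))
        rw [ih.1, ih.2, pvFilter_decomp (d :: r)] at hfd
        split at hfd <;> simp_all
      refine ⟨?_, ?_⟩
      · rw [pvSp_headI_cons c hc, pvSp_headI_cons c hc, ih.1]
      · rw [pvTok_cons c hc, pvTok_cons c hc, ih.1, htail]
  | case3 l h =>
    match l, h with
    | [], _ => simp [pvRep]
    | [c], _ => simp [pvRep]
    | c :: d :: r, h => exact absurd rfl (h c d r)

lemma pvIc_singleton (s : List Char) : [' '].intercalate [s] = s := by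
  simp [List.intercalate]

lemma pvIc_cons (s t : List Char) (u : List (List Char)) :
    [' '].intercalate (s :: t :: u) = s ++ ' ' :: [' '].intercalate (t :: u) := by
  simp [List.intercalate, List.intersperse]

lemma pvIc_cons_head (c : Char) (y : List Char) (zs : List (List Char)) :
    [' '].intercalate ((c :: y) :: zs) = c :: [' '].intercalate (y :: zs) := by
  cases zs with
  | nil => rw [pvIc_singleton, pvIc_singleton]
  | cons z zs => rw [pvIc_cons, pvIc_cons]; simp

lemma pvF : ∀ (n : Nat) (t : List Char), t.length ≤ n → pvDbl t = false →
    t.head? ≠ some ' ' → t.getLast? ≠ some ' ' →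
    [' '].intercalate ((pvSp t).filter (fun w => w ≠ [])) = t := by
  intro n
  induction n with
  | zero =>
    intro t h _ _ _
    have : t = [] := by cases t <;> simp_all
    subst this
    simp [pvSp, List.intercalate]
  | succ n ih =>
    intro t hlen hdbl hhead hlast
    match t with
    | [] => simp [pvSp, List.intercalate]
    | [c] =>
      have hc : c ≠ ' ' := by simp at hhead; exact fun h => hhead (by rw [h])
      rw [pvTok_cons c hc]
      simp [pvSp, pvIc_singleton]
    | c :: d :: r =>
      have hc : c ≠ ' ' := by simp at hhead; exact fun h => hhead (by rw [h])
      by_cases hd : d = ' '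
      · subst hd
        match r with
        | [] => simp at hlast
        | e :: r2 =>
          have he : e ≠ ' ' := by
            intro h; subst h
            simp [pvDbl] at hdbl
          have hdbl2 : pvDbl (e :: r2) = false := by
            simp [pvDbl] at hdbl; tauto
          rw [pvTok_cons c hc, pvSp_headI_space, pvSp_tail_space]
          rw [pvTok_cons e he, pvIc_cons, ← pvTok_cons e he]
          rw [ih (e :: r2) (by simp at hlen ⊢; omega) hdbl2 (by simp [he])
            (by rw [List.getLast?_cons_cons, List.getLast?_cons_cons] at hlast; exact hlast)]
          simp
      · have hdbl2 : pvDbl (d :: r) = false := by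
          simp [pvDbl] at hdbl; tauto
        rw [pvTok_cons c hc, pvSp_headI_cons d hd, pvSp_tail_cons d hd]
        rw [pvIc_cons_head, ← pvTok_cons d hd]
        rw [ih (d :: r) (by simp at hlen ⊢; omega) hdbl2 (by simp [hd])
          (by rw [List.getLast?_cons_cons] at hlast; exact hlast)]

lemma pvMain : ∀ (n : Nat) (t : List Char), t.length ≤ n →
    t.head? ≠ some ' ' → t.getLast? ≠ some ' ' →
    pvCollapse t = [' '].intercalate ((pvSp t).filter (fun w => w ≠ [])) := by
  intro n
  induction n with
  | zero =>
    intro t h hhead hlast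
    have : t = [] := by cases t <;> simp_all
    subst this
    rw [pvCollapse, dif_neg (by decide)]
    simp [pvSp, List.intercalate]
  | succ n ih =>
    intro t hlen hhead hlast
    rw [pvCollapse]
    by_cases hin : PySem.Chars.isIn [' ', ' '] t = true
    · rw [dif_pos hin, pvReplace_eq]
      have hdbl : pvDbl t = true := (pvIsIn_eq_dbl t).symm.trans hin
      have hlt := pvRep_length_lt t hdbl
      rw [ih (pvRep t) (by omega) (by rw [pvRep_head?]; exact hhead)
        (by rw [pvRep_getLast? t hlast]; exact hlast)]
      rw [(pvRep_tokens t).2]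
    · rw [dif_neg hin]
      have hdbl : pvDbl t = false := by
        rw [← pvIsIn_eq_dbl]
        exact Bool.not_eq_true _ ▸ (by simpa using hin)
      exact (pvF (n + 1) t hlen hdbl hhead hlast).symm

lemma pvHead?_dropWhile (p : Char → Bool) (l : List Char) (x : Char)
    (h : (l.dropWhile p).head? = some x) : p x = false := by
  induction l with
  | nil => simp [List.dropWhile] at h
  | cons a t ih =>
    rw [List.dropWhile_cons] at h
    split at h
    · exact ih h
    · simp_all

lemma pvStrip_last (x : List Char) : (PySem.Chars.strip x).getLast? ≠ some ' ' := by
  intro h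
  rw [PySem.Chars.strip, PySem.Chars.rstrip, List.getLast?_reverse] at h
  have := pvHead?_dropWhile _ _ _ h
  simp [PySem.Chars.isspace] at this

lemma pvStrip_head (x : List Char) : (PySem.Chars.strip x).head? ≠ some ' ' := by
  intro h
  rw [PySem.Chars.strip] at h
  have hz : (PySem.Chars.lstrip x).head? ≠ some ' ' := by
    intro hh
    rw [PySem.Chars.lstrip] at hh
    have := pvHead?_dropWhile _ _ _ hh
    simp [PySem.Chars.isspace] at this
  rw [PySem.Chars.rstrip] at h
  have hpre : (List.dropWhile PySem.Chars.isspace (PySem.Chars.lstrip x).reverse).reverse <+: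
      PySem.Chars.lstrip x := by
    have := List.dropWhile_suffix (l := (PySem.Chars.lstrip x).reverse) PySem.Chars.isspace
    have h2 := List.reverse_prefix.2 this
    simpa using h2
  obtain ⟨rest, hr⟩ := hpre
  cases hw : (List.dropWhile PySem.Chars.isspace (PySem.Chars.lstrip x).reverse).reverse with
  | nil => rw [hw] at h; simp at h
  | cons a w =>
    rw [hw] at h hr
    simp at h
    subst h
    rw [← hr] at hz
    simp at hz

-- ===== VERDICT (by name: the statement is the Claim_ definition above) =====
theorem filter_string_spec : Claim_equal_filter_string := by
  intro s e _
  unfold Spec_filter_string filter_string filter_string_alt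
  simp only []
  have hfun : (fun (res : List Char) (c : Char) =>
      if PySem.Chars.lower [c] ≠ PySem.Chars.lower e.toList then res ++ [c] else res) =
      (fun (res : List Char) (c : Char) =>
        if (fun c => decide (PySem.Chars.lower [c] ≠ PySem.Chars.lower e.toList)) c = true
        then res ++ [id c] else res) := by
    funext res c
    simp
  rw [hfun, PySem.List.foldl_append_if]
  simp only [List.map_id, List.nil_append]
  rw [pvSplitOn_eq, PySem.Chars.join]
  congr 1
  exact pvMain _ _ (le_refl _) (pvStrip_head _) (pvStrip_last _)
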